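-- pv_equiv track=rewrite | github.com/dssantos/fiverr-desmondtoye | cut_videos_with_faces.py | has_consecutive_detections
-- ===== SOURCE A (Python) =====
-- def has_consecutive_detections(detections, start, end, min_consecutive=4):
--     consecutive = 0
--     for i in range(start, end + 1):
--         if detections[i]:
--             consecutive += 1
--             if consecutive >= min_consecutive:
--                 return True
--         else:
--             consecutive = 0
--     return False
-- ===== SOURCE B (Python) =====
-- def has_consecutive_detections(detections, start, end, min_consecutive=4):
--     m = max(min_consecutive, 1)
--     return any(
--         all(detections[j] for j in range(i, i + m))
--         for i in range(start, end + 2 - m)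
--     )
-- ===== Notes on version B (the rewrite author's own statement) =====
-- stated objective: alternative
-- what changed: A's stateful running-counter loop is replaced by a declarative short-circuiting window scan: any(all(detections[j] for j in range(i, i+m)) for i in range(start, end+2-m)) with m = max(min_consecutive, 1), maintaining no counter at all.
import Mathlib
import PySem

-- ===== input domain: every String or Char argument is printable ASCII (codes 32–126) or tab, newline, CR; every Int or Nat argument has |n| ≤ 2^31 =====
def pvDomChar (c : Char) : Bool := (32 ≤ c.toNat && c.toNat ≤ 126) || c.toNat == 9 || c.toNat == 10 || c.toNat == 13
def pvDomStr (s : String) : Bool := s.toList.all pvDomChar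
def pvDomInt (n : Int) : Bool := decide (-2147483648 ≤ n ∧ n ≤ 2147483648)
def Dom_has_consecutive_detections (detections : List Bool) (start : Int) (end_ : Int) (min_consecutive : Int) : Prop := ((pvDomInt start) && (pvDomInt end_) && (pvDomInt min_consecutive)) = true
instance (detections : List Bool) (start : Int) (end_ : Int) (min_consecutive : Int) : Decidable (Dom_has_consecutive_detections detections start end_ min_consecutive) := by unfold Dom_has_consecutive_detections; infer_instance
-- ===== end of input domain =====

-- B replaces A's running-counter loop by a declarative window scan ("some window of
-- max(min_consecutive,1) consecutive positions is all True"); objective: alternative, not faster.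

-- ===== PORT A =====
-- A's loop over range(start, end+1) with the `consecutive` counter; `none` from pyGet?
-- is Python's IndexError (such inputs are excluded by Pre_, where the `false` is never claimed).
def pvA_loop (detections : List Bool) (min_consecutive : Int) : List Int → Int → Bool
  | [], _ => false
  | i :: rest, consecutive =>
    match PySem.List.pyGet? detections i with
    | none => false
    | some b =>
      if b then
        if consecutive + 1 ≥ min_consecutive then true
        else pvA_loop detections min_consecutive rest (consecutive + 1)
      else pvA_loop detections min_consecutive rest 0

def has_consecutive_detections (detections : List Bool) (start : Int) (end_ : Int) (min_consecutive : Int) : Bool :=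
  pvA_loop detections min_consecutive (PySem.List.pyRange start (end_ + 1) 1) 0

-- ===== PORT B =====
-- all(detections[j] for j in range(i, i+m)) — short-circuiting; none = IndexError, as above
def pvB_window (detections : List Bool) : List Int → Bool
  | [] => true
  | j :: rest =>
    match PySem.List.pyGet? detections j with
    | none => false
    | some b => b && pvB_window detections rest

-- any(window(i) for i in range(start, end+2-m)) — short-circuiting
def pvB_scan (detections : List Bool) (m : Int) : List Int → Bool
  | [] => false
  | i :: rest =>
    pvB_window detections (PySem.List.pyRange i (i + m) 1) || pvB_scan detections m rest

def has_consecutive_detections_alt (detections : List Bool) (start : Int) (end_ : Int) (min_consecutive : Int) : Bool :=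
  let m := max min_consecutive 1
  pvB_scan detections m (PySem.List.pyRange start (end_ + 2 - m) 1)

-- ===== PRECONDITION & SPEC =====
-- Pre_ is exactly the set of inputs on which Python's A returns (no IndexError): the index
-- range is empty, or lies entirely inside [-len, len), or (reaching out of range) a window of
-- max(min_consecutive,1) consecutive Trues ends at a valid position p ≤ end_, so A returns True
-- before touching any out-of-range index.
def Pre_has_consecutive_detections (detections : List Bool) (start : Int) (end_ : Int) (min_consecutive : Int) : Prop :=
  start > end_ ∨
  (-(detections.length : Int) ≤ start ∧ end_ < (detections.length : Int)) ∨
  (-(detections.length : Int) ≤ start ∧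
    ∃ p ∈ PySem.List.pyRange (start + max min_consecutive 1 - 1)
            (min (end_ + 1) (detections.length : Int)) 1,
      ∀ j ∈ PySem.List.pyRange (p - max min_consecutive 1 + 1) (p + 1) 1,
        PySem.List.pyGet? detections j = some true)
instance (detections : List Bool) (start : Int) (end_ : Int) (min_consecutive : Int) : Decidable (Pre_has_consecutive_detections detections start end_ min_consecutive) := by unfold Pre_has_consecutive_detections; infer_instance

def pvWitness_has_consecutive_detections : List Bool × Int × Int × Int := ([true, true, false], 0, 2, 2)

def Spec_has_consecutive_detections (detections : List Bool) (start : Int) (end_ : Int) (min_consecutive : Int) (out : Bool) : Prop := out = has_consecutive_detections_alt detections start end_ min_consecutive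
instance (detections : List Bool) (start : Int) (end_ : Int) (min_consecutive : Int) (out : Bool) : Decidable (Spec_has_consecutive_detections detections start end_ min_consecutive out) := by unfold Spec_has_consecutive_detections; infer_instance

-- ===== CLAIM (what is proved, stated in full; the proofs are below) =====
def Claim_equal_has_consecutive_detections : Prop := ∀ (detections : List Bool) (start : Int) (end_ : Int) (min_consecutive : Int), Dom_has_consecutive_detections detections start end_ min_consecutive → Pre_has_consecutive_detections detections start end_ min_consecutive → Spec_has_consecutive_detections detections start end_ min_consecutive (has_consecutive_detections detections start end_ min_consecutive)

-- ===== LEMMAS AND PROOFS =====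

-- an in-range index never yields `none`
lemma pvGet_isSome (detections : List Bool) (j : Int)
    (h1 : -(detections.length : Int) ≤ j) (h2 : j < (detections.length : Int)) :
    (PySem.List.pyGet? detections j).isSome := by
  rw [Option.isSome_iff_ne_none, Ne, PySem.List.pyGet?_eq_none_iff]
  intro hc
  exact hc ⟨h1, h2⟩

-- B's inner `all`: true iff every index in [a, b) holds a True
lemma pvB_window_iff (detections : List Bool) (a b : Int) :
    pvB_window detections (PySem.List.pyRange a b 1) = true ↔
      ∀ j, a ≤ j → j < b → PySem.List.pyGet? detections j = some true := by
  by_cases hab : b ≤ a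
  · rw [PySem.List.pyRange_one_eq_nil hab]
    simp only [pvB_window]
    constructor
    · intro _ j hj1 hj2; omega
    · intro _; trivial
  · have hd : (b - (a + 1)).toNat < (b - a).toNat := by omega
    rw [PySem.List.pyRange_one_cons (by omega)]
    simp only [pvB_window]
    rcases hg : PySem.List.pyGet? detections a with _ | bv
    · constructor
      · intro h; cases h
      · intro h
        have := h a le_rfl (by omega)
        rw [hg] at this; cases this
    · rw [Bool.and_eq_true, pvB_window_iff detections (a + 1) b]
      constructor
      · rintro ⟨hbv, hrest⟩ j hj1 hj2
        rcases eq_or_lt_of_le hj1 with rfl | hj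
        · rw [hg]; cases bv
          · cases hbv
          · rfl
        · exact hrest j (by omega) hj2
      · intro h
        have ha := h a le_rfl (by omega)
        rw [hg] at ha
        refine ⟨by injection ha, fun j hj1 hj2 => h j (by omega) hj2⟩
termination_by (b - a).toNat

-- B's outer `any`: true iff some window in [a, b) is all-True
lemma pvB_scan_iff (detections : List Bool) (m a b : Int) :
    pvB_scan detections m (PySem.List.pyRange a b 1) = true ↔
      ∃ i, a ≤ i ∧ i < b ∧
        (∀ j, i ≤ j → j < i + m → PySem.List.pyGet? detections j = some true) := by
  by_cases hab : b ≤ a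
  · rw [PySem.List.pyRange_one_eq_nil hab]
    simp only [pvB_scan]
    constructor
    · intro h; cases h
    · rintro ⟨i, hi1, hi2, _⟩; omega
  · have hd : (b - (a + 1)).toNat < (b - a).toNat := by omega
    rw [PySem.List.pyRange_one_cons (by omega)]
    simp only [pvB_scan, Bool.or_eq_true]
    rw [pvB_window_iff, pvB_scan_iff detections m (a + 1) b]
    constructor
    · rintro (hw | ⟨i, hi1, hi2, hw⟩)
      · exact ⟨a, le_rfl, by omega, hw⟩
      · exact ⟨i, by omega, hi2, hw⟩
    · rintro ⟨i, hi1, hi2, hw⟩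
      rcases eq_or_lt_of_le hi1 with rfl | hi
      · exact Or.inl hw
      · exact Or.inr ⟨i, by omega, hi2, hw⟩
termination_by (b - a).toNat

-- A returns True once a full window of Trues ending at p is reached, regardless of
-- anything beyond p (the early exit): invariant over the counter c
lemma pvA_loop_true (detections : List Bool) (mc e : Int) (p : Int) :
    ∀ l c, 0 ≤ c → l ≤ p → p ≤ e →
    (∀ j, l ≤ j → j ≤ p → (PySem.List.pyGet? detections j).isSome) →
    (∀ j, p - max mc 1 + 1 ≤ j → j ≤ p → PySem.List.pyGet? detections j = some true) →
    l - (p - max mc 1 + 1) ≤ c →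
    pvA_loop detections mc (PySem.List.pyRange l (e + 1) 1) c = true := by
  intro l c hc hlp hpe hvalid hwin hcred
  have hd : (p + 1 - (l + 1)).toNat < (p + 1 - l).toNat := by omega
  rw [PySem.List.pyRange_one_cons (by omega)]
  simp only [pvA_loop]
  obtain ⟨bv, hg⟩ := Option.isSome_iff_exists.mp (hvalid l le_rfl hlp)
  rw [hg]
  by_cases hls : p - max mc 1 + 1 ≤ l
  · have hbt : bv = true := by
      have := hwin l hls hlp
      rw [hg] at this; injection this
    subst hbt
    simp only [if_true]
    split
    · rfl
    · rename_i hlt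
      have hlp' : l < p := by omega
      exact pvA_loop_true detections mc e p (l + 1) (c + 1) (by omega) (by omega) hpe
        (fun j h1 h2 => hvalid j (by omega) h2) hwin (by omega)
  · have hrec : ∀ c', 0 ≤ c' → l + 1 - (p - max mc 1 + 1) ≤ c' →
        pvA_loop detections mc (PySem.List.pyRange (l + 1) (e + 1) 1) c' = true :=
      fun c' h1 h2 => pvA_loop_true detections mc e p (l + 1) c' h1 (by omega) hpe
        (fun j hj1 hj2 => hvalid j (by omega) hj2) hwin h2
    cases bv
    · simp only [Bool.false_eq_true, if_false]
      exact hrec 0 le_rfl (by omega)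
    · simp only [if_true]
      split
      · rfl
      · exact hrec (c + 1) (by omega) (by omega)
termination_by l => (p + 1 - l).toNat

-- characterisation of A's loop under full validity of the range
lemma pvA_loop_iff (detections : List Bool) (mc e : Int) :
    ∀ l c, 0 ≤ c →
    (∀ j, l ≤ j → j ≤ e → (PySem.List.pyGet? detections j).isSome) →
    (pvA_loop detections mc (PySem.List.pyRange l (e + 1) 1) c = true ↔
      (∃ p, l ≤ p ∧ p ≤ e ∧
          (∀ j, l ≤ j → j ≤ p → PySem.List.pyGet? detections j = some true) ∧
          max mc 1 ≤ c + (p - l + 1)) ∨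
      (∃ s, l ≤ s ∧ s + max mc 1 - 1 ≤ e ∧
          ∀ j, s ≤ j → j ≤ s + max mc 1 - 1 → PySem.List.pyGet? detections j = some true)) := by
  intro l c hc hvalid
  by_cases hle : e < l
  · rw [PySem.List.pyRange_one_eq_nil (by omega)]
    simp only [pvA_loop]
    constructor
    · intro h; cases h
    · rintro (⟨p, h1, h2, _⟩ | ⟨s, h1, h2, _⟩) <;> omega
  · have hd : (e + 1 - (l + 1)).toNat < (e + 1 - l).toNat := by omega
    rw [PySem.List.pyRange_one_cons (by omega)]
    simp only [pvA_loop]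
    obtain ⟨bv, hg⟩ := Option.isSome_iff_exists.mp (hvalid l le_rfl (by omega))
    rw [hg]
    cases bv
    · -- detections[l] is False: counter resets
      simp only [Bool.false_eq_true, if_false]
      rw [pvA_loop_iff detections mc e (l + 1) 0 le_rfl
        (fun j h1 h2 => hvalid j (by omega) h2)]
      have hnl : ¬ PySem.List.pyGet? detections l = some true := by
        rw [hg]; intro h; cases h
      constructor
      · rintro (⟨p, h1, h2, h3, h4⟩ | ⟨s, h1, h2, h3⟩)
        · exact Or.inr ⟨p - max mc 1 + 1, by omega, by omega,
            fun j hj1 hj2 => h3 j (by omega) (by omega)⟩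
        · exact Or.inr ⟨s, by omega, h2, h3⟩
      · rintro (⟨p, h1, h2, h3, h4⟩ | ⟨s, h1, h2, h3⟩)
        · exact absurd (h3 l le_rfl (by omega)) hnl
        · rcases eq_or_lt_of_le h1 with heq | hs
          · exact absurd (h3 l (le_of_eq heq.symm) (by omega)) hnl
          · exact Or.inr ⟨s, by omega, h2, h3⟩
    · -- detections[l] is True
      simp only [if_true]
      have htl : PySem.List.pyGet? detections l = some true := hg
      split
      · rename_i hge
        constructor
        · intro _
          exact Or.inl ⟨l, le_rfl, by omega, by
            intro j h1 h2
            have : j = l := by omega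
            subst this; exact htl, by omega⟩
        · intro _; rfl
      · rename_i hlt
        have hmc : max mc 1 = mc := by omega
        rw [pvA_loop_iff detections mc e (l + 1) (c + 1) (by omega)
          (fun j h1 h2 => hvalid j (by omega) h2)]
        constructor
        · rintro (⟨p, h1, h2, h3, h4⟩ | ⟨s, h1, h2, h3⟩)
          · refine Or.inl ⟨p, by omega, h2, ?_, by omega⟩
            intro j hj1 hj2
            rcases eq_or_lt_of_le hj1 with rfl | hj
            · exact htl
            · exact h3 j (by omega) hj2
          · exact Or.inr ⟨s, by omega, h2, h3⟩
        · rintro (⟨p, h1, h2, h3, h4⟩ | ⟨s, h1, h2, h3⟩)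
          · have hpl : l < p := by omega
            exact Or.inl ⟨p, by omega, h2, fun j hj1 hj2 => h3 j (by omega) hj2, by omega⟩
          · rcases eq_or_lt_of_le h1 with heq | hs
            · exact Or.inl ⟨s + max mc 1 - 1, by omega, by omega,
                fun j hj1 hj2 => h3 j (by omega) (by omega), by omega⟩
            · exact Or.inr ⟨s, by omega, h2, h3⟩
termination_by l => (e + 1 - l).toNat

-- ===== VERDICT (by name: the statement is the Claim_ definition above) =====
theorem has_consecutive_detections_spec : Claim_equal_has_consecutive_detections := by
  intro detections start end_ mc _dom pre
  unfold Spec_has_consecutive_detections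
  unfold Pre_has_consecutive_detections at pre
  simp only [has_consecutive_detections, has_consecutive_detections_alt]
  have hm1 : (1 : Int) ≤ max mc 1 := le_max_right mc 1
  rcases pre with h | ⟨h1, h2⟩ | ⟨h1, p, hp, hwin⟩
  · -- empty index range: both loops run over []
    rw [PySem.List.pyRange_one_eq_nil (by omega : end_ + 1 ≤ start),
      PySem.List.pyRange_one_eq_nil (by omega : end_ + 2 - max mc 1 ≤ start)]
    simp only [pvA_loop, pvB_scan]
  · -- the whole index range is in [-len, len): both sides ↔ "some all-True window"
    have hv : ∀ j, start ≤ j → j ≤ end_ → (PySem.List.pyGet? detections j).isSome :=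
      fun j hj1 hj2 => pvGet_isSome detections j (by omega) (by omega)
    rw [Bool.eq_iff_iff, pvA_loop_iff detections mc end_ start 0 le_rfl hv,
      pvB_scan_iff detections (max mc 1) start (end_ + 2 - max mc 1)]
    constructor
    · rintro (⟨p, hp1, hp2, hp3, hp4⟩ | ⟨s, hs1, hs2, hs3⟩)
      · exact ⟨p - max mc 1 + 1, by omega, by omega,
          fun j hj1 hj2 => hp3 j (by omega) (by omega)⟩
      · exact ⟨s, hs1, by omega, fun j hj1 hj2 => hs3 j hj1 (by omega)⟩
    · rintro ⟨i, hi1, hi2, hw⟩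
      exact Or.inr ⟨i, hi1, by omega, fun j hj1 hj2 => hw j hj1 (by omega)⟩
  · -- A exits early on a full window ending at valid p; B finds the same window
    rw [PySem.List.mem_pyRange_one] at hp
    obtain ⟨hp1, hp2⟩ := hp
    have hwin' : ∀ j, p - max mc 1 + 1 ≤ j → j ≤ p →
        PySem.List.pyGet? detections j = some true :=
      fun j hj1 hj2 => hwin j (PySem.List.mem_pyRange_one.mpr ⟨hj1, by omega⟩)
    have hA : pvA_loop detections mc (PySem.List.pyRange start (end_ + 1) 1) 0 = true :=
      pvA_loop_true detections mc end_ p start 0 le_rfl (by omega) (by omega)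
        (fun j hj1 hj2 => pvGet_isSome detections j (by omega) (by omega))
        hwin' (by omega)
    have hB : pvB_scan detections (max mc 1)
        (PySem.List.pyRange start (end_ + 2 - max mc 1) 1) = true :=
      (pvB_scan_iff detections (max mc 1) start (end_ + 2 - max mc 1)).mpr
        ⟨p - max mc 1 + 1, by omega, by omega, fun j hj1 hj2 => hwin' j hj1 (by omega)⟩
    rw [hA, hB]
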